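-- pv_equiv track=rewrite | github.com/rupakyeware/DSA-Problems | LeetCode/sptriangle.py | is_special_triangle
-- ===== SOURCE A (Python) =====
-- def is_special_triangle(h, numbers):
--     n = h * (h + 1) // 2
--     if len(numbers) != n:
--         return "NO"
--     numbers.sort()
--     idx = 0
--     for row in range(1, h):
--         for col in range(row):
--             current = idx + col
--             left_child = idx + row + col
--             right_child = idx + row + col + 1
--             if numbers[current] >= numbers[left_child] or numbers[current] >= numbers[right_child]:
--                 return "NO"
--         idx += row
--     return "YES"
-- ===== SOURCE B (Python) =====
-- def is_special_triangle(h, numbers):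
--     if len(numbers) != h * (h + 1) // 2:
--         return "NO"
--     numbers.sort()
--     # After sorting, a parent can only tie (never exceed) its children, so the
--     # triangle is special iff no value's run of duplicates is long enough to
--     # reach from its first position down to the next row.  Examine only the
--     # boundaries of the maximal runs of equal values.
--     starts = [k for k in range(len(numbers)) if k == 0 or numbers[k - 1] != numbers[k]]
--     bounds = starts + [len(numbers)]
--     for a, b in zip(bounds, bounds[1:]):
--         r = 1                      # row (1-indexed) containing index a
--         while r * (r + 1) // 2 <= a:
--             r += 1
--         if r < h and r < b - a:    # run reaches index a + r, the left child's slot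
--             return "NO"
--     return "YES"
-- ===== Notes on version B (the rewrite author's own statement) =====
-- stated objective: alternative
-- what changed: Instead of comparing every parent with its children over the triangle, B uses the fact that on the sorted list a parent can only tie its children, so it computes the maximal runs of equal values (their start indices) and checks arithmetically, per run, whether the run is longer than the 1-indexed row of its first element (and that row is a parent row); only run boundaries are examined, no parent-child pairing.
import Mathlib
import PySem

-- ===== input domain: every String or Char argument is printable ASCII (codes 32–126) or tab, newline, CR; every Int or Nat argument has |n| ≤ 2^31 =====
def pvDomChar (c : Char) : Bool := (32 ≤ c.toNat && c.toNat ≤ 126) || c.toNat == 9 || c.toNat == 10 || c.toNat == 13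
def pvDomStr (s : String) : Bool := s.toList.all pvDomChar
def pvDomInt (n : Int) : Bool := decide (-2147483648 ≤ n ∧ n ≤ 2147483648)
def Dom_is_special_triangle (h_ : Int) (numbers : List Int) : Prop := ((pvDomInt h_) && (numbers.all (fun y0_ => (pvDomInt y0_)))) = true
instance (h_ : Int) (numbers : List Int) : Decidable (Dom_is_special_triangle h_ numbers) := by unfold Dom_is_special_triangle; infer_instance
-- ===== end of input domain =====

-- B replaces A's parent-vs-children scan of the whole triangle by a run-boundary analysis of
-- the sorted list (on a sorted list a parent can only tie its children, so only the start and
-- length of each maximal run of equal values matter); same O(n log n) cost, different algorithm.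
-- Both A and B sort `numbers` in place (the same observable mutation); the equivalence proved
-- here is about the return value.

-- ===== PORT A =====
-- numbers[i]: A's length guard keeps every access in range, so pyGet? is always `some`
-- and the `.getD 0` default is never used (the Python never raises).
def pvGetA (ns : List Int) (i : Int) : Int := (PySem.List.pyGet? ns i).getD 0

-- inner `for col in range(row)` loop with its early return (false = returned "NO")
def pvAcols (ns : List Int) (idx row : Int) : List Int → Bool
  | [] => true
  | col :: rest =>
    if pvGetA ns (idx + col) ≥ pvGetA ns (idx + row + col)
        ∨ pvGetA ns (idx + col) ≥ pvGetA ns (idx + row + col + 1) then false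
    else pvAcols ns idx row rest

-- outer `for row in range(1, h)` loop carrying idx
def pvArows (ns : List Int) (idx : Int) : List Int → Bool
  | [] => true
  | row :: rest =>
    pvAcols ns idx row (PySem.List.pyRange 0 row 1) && pvArows ns (idx + row) rest

def is_special_triangle (h_ : Int) (numbers : List Int) : String :=
  let n := PySem.Int.floordiv (h_ * (h_ + 1)) 2
  if (numbers.length : Int) ≠ n then "NO"
  else
    let ns := PySem.List.sorted numbers (fun x => x) false
    if pvArows ns 0 (PySem.List.pyRange 1 h_ 1) then "YES" else "NO"

-- ===== PORT B =====
-- the list-comprehension filter `k == 0 or numbers[k-1] != numbers[k]`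
def pvStartB (ns : List Int) (k : Int) : Bool :=
  (k == 0) || !(pvGetA ns (k - 1) == pvGetA ns k)

-- starts = [k for k in range(len(numbers)) if ...]
def pvStartsB (ns : List Int) : List Int :=
  (PySem.List.pyRange 0 (ns.length : Int) 1).filter (pvStartB ns)

-- bounds = starts + [len(numbers)]
def pvBoundsB (ns : List Int) : List Int := pvStartsB ns ++ [(ns.length : Int)]

-- the `while r * (r + 1) // 2 <= a: r += 1` loop; structural recursion on a fuel that
-- provably suffices (a.toNat + 2 iterations: r grows by 1 each pass and stops once r > a + 1)
def pvRowOfB (fuel : Nat) (a r : Int) : Int :=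
  match fuel with
  | 0 => r
  | fuel + 1 =>
    if PySem.Int.floordiv (r * (r + 1)) 2 ≤ a then pvRowOfB fuel a (r + 1) else r

-- `for a, b in zip(bounds, bounds[1:])` with the early return
def pvPairsB (h_ : Int) : List (Int × Int) → Bool
  | [] => true
  | (a, b) :: rest =>
    if pvRowOfB (a.toNat + 2) a 1 < h_ ∧ pvRowOfB (a.toNat + 2) a 1 < b - a then false
    else pvPairsB h_ rest

def is_special_triangle_alt (h_ : Int) (numbers : List Int) : String :=
  if (numbers.length : Int) ≠ PySem.Int.floordiv (h_ * (h_ + 1)) 2 then "NO"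
  else
    let ns := PySem.List.sorted numbers (fun x => x) false
    if pvPairsB h_ ((pvBoundsB ns).zip (PySem.List.slice (pvBoundsB ns) (some 1) none))
    then "YES" else "NO"

-- ===== PRECONDITION & SPEC =====
def Spec_is_special_triangle (h_ : Int) (numbers : List Int) (out : String) : Prop := out = is_special_triangle_alt h_ numbers
instance (h_ : Int) (numbers : List Int) (out : String) : Decidable (Spec_is_special_triangle h_ numbers out) := by unfold Spec_is_special_triangle; infer_instance

-- ===== CLAIM (what is proved, stated in full; the proofs are below) =====
def Claim_equal_is_special_triangle : Prop := ∀ (h_ : Int) (numbers : List Int), Dom_is_special_triangle h_ numbers → Spec_is_special_triangle h_ numbers (is_special_triangle h_ numbers)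

-- ===== LEMMAS AND PROOFS =====

-- r-th triangular number
def pvTN (r : Nat) : Nat := r * (r + 1) / 2

lemma pvTN_two (r : Nat) : 2 * pvTN r = r * (r + 1) := by
  obtain ⟨k, hk⟩ : Even (r * (r + 1)) := Nat.even_mul_succ_self r
  unfold pvTN; rw [hk]; omega

lemma pvTN_succ (r : Nat) : pvTN (r + 1) = pvTN r + r + 1 := by
  have h1 := pvTN_two r
  have h2 := pvTN_two (r + 1)
  have h3 : (r + 1) * (r + 1 + 1) = r * (r + 1) + 2 * (r + 1) := by ring
  omega

lemma pvTN_mono {r s : Nat} (h : r ≤ s) : pvTN r ≤ pvTN s :=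
  Nat.div_le_div_right (Nat.mul_le_mul h (by omega))

lemma pvTN_pred {r : Nat} (h : 1 ≤ r) : pvTN (r - 1) + r = pvTN r := by
  obtain ⟨b, rfl⟩ : ∃ b, r = b + 1 := ⟨r - 1, by omega⟩
  have := pvTN_succ b
  simp only [Nat.add_sub_cancel]
  omega

-- the common content: some parent slot p in row r (1-indexed), r < h, ties its left child
def pvBad (h_ : Int) (ns : List Int) : Prop :=
  ∃ p r : Nat, 1 ≤ r ∧ (r : Int) < h_ ∧ pvTN (r - 1) ≤ p ∧ p < pvTN r ∧
    ns.getD p 0 = ns.getD (p + r) 0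

-- ---------- A-side characterisation ----------

lemma pvAcols_true_iff (ns : List Int) (idx row : Int) (cols : List Int) :
    pvAcols ns idx row cols = true ↔
      ∀ col ∈ cols, ¬ (pvGetA ns (idx + col) ≥ pvGetA ns (idx + row + col)
        ∨ pvGetA ns (idx + col) ≥ pvGetA ns (idx + row + col + 1)) := by
  induction cols with
  | nil => simp [pvAcols]
  | cons c cs ih =>
    simp only [pvAcols]
    split_ifs with h
    · simp only [false_iff]
      intro hall
      exact hall c (List.mem_cons_self) h
    · rw [ih]
      constructor
      · intro hall col hm
        rcases List.mem_cons.mp hm with rfl | hm'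
        · exact h
        · exact hall col hm'
      · intro hall col hm
        exact hall col (List.mem_cons_of_mem _ hm)

lemma pvGetA_nat (ns : List Int) (p : Nat) : pvGetA ns (p : Int) = ns.getD p 0 := by
  simp [pvGetA, PySem.List.pyGet?_natCast, List.getD_eq_getElem?_getD]

lemma pvArows_iff (ns : List Int) :
    ∀ (k a : Nat), 1 ≤ a →
      (pvArows ns ((pvTN (a - 1) : Nat) : Int)
          (PySem.List.pyRange (a : Int) ((a + k : Nat) : Int) 1) = true ↔
        ∀ r : Nat, a ≤ r → r < a + k →
          pvAcols ns ((pvTN (r - 1) : Nat) : Int) ((r : Nat) : Int)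
            (PySem.List.pyRange 0 ((r : Nat) : Int) 1) = true) := by
  intro k
  induction k with
  | zero =>
    intro a ha
    rw [PySem.List.pyRange_one_eq_nil (by push_cast; omega)]
    constructor
    · intro _ r h1 h2; omega
    · intro _; rfl
  | succ k ih =>
    intro a ha
    rw [PySem.List.pyRange_one_cons (by push_cast; omega)]
    simp only [pvArows, Bool.and_eq_true]
    have hidx : ((pvTN (a - 1) : Nat) : Int) + (a : Int) = ((pvTN a : Nat) : Int) := by
      rw [show pvTN a = pvTN (a - 1) + a from (pvTN_pred ha).symm]
      push_cast
      ring
    rw [hidx]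
    rw [show (a : Int) + 1 = ((a + 1 : Nat) : Int) from by push_cast; ring]
    rw [show ((a + (k + 1) : Nat) : Int) = (((a + 1) + k : Nat) : Int) from by push_cast; ring]
    have ih' := ih (a + 1) (by omega)
    simp only [Nat.add_sub_cancel] at ih'
    rw [ih']
    constructor
    · rintro ⟨h1, h2⟩ r hr1 hr2
      rcases Nat.eq_or_lt_of_le hr1 with he | hlt
      · rw [← he]; exact h1
      · exact h2 r (by omega) (by omega)
    · intro hall
      exact ⟨hall a (le_refl a) (by omega), fun r h1 h2 => hall r (by omega) (by omega)⟩

-- one row: A's column loop on a sorted list checks "no parent ties its left child"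
lemma pvAcols_row_iff (ns : List Int)
    (hmono : ∀ p q : Nat, p ≤ q → q < ns.length → ns.getD p 0 ≤ ns.getD q 0)
    (r : Nat) (hr1 : 1 ≤ r) (hrn : pvTN (r + 1) ≤ ns.length) :
    (pvAcols ns ((pvTN (r - 1) : Nat) : Int) ((r : Nat) : Int)
        (PySem.List.pyRange 0 ((r : Nat) : Int) 1) = true) ↔
      ∀ c : Nat, c < r → ns.getD (pvTN (r - 1) + c) 0 ≠ ns.getD (pvTN (r - 1) + c + r) 0 := by
  have hT1 := pvTN_pred hr1
  have hT2 := pvTN_succ r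
  rw [pvAcols_true_iff]
  constructor
  · intro hall c hc heq
    apply hall ((c : Nat) : Int)
      (PySem.List.mem_pyRange_one.mpr ⟨by positivity, by exact_mod_cast hc⟩)
    left
    rw [show ((pvTN (r - 1) : Nat) : Int) + (c : Int) = ((pvTN (r - 1) + c : Nat) : Int)
        from by push_cast; ring,
      show ((pvTN (r - 1) : Nat) : Int) + (r : Int) + (c : Int)
          = ((pvTN (r - 1) + c + r : Nat) : Int) from by push_cast; ring,
      pvGetA_nat, pvGetA_nat, heq]
  · intro hall col hmem hbad
    obtain ⟨h0, hlt⟩ := PySem.List.mem_pyRange_one.mp hmem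
    obtain ⟨c, rfl⟩ : ∃ c : Nat, col = (c : Int) := ⟨col.toNat, (Int.toNat_of_nonneg h0).symm⟩
    have hc : c < r := by exact_mod_cast hlt
    have hb1 : pvTN (r - 1) + c + r + 1 < ns.length := by omega
    rw [show ((pvTN (r - 1) : Nat) : Int) + (c : Int) = ((pvTN (r - 1) + c : Nat) : Int)
        from by push_cast; ring,
      show ((pvTN (r - 1) : Nat) : Int) + (r : Int) + (c : Int)
          = ((pvTN (r - 1) + c + r : Nat) : Int) from by push_cast; ring] at hbad
    rw [pvGetA_nat, pvGetA_nat] at hbad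
    have hl1 : ns.getD (pvTN (r - 1) + c) 0 ≤ ns.getD (pvTN (r - 1) + c + r) 0 :=
      hmono _ _ (by omega) (by omega)
    rcases hbad with hb | hb
    · exact hall c hc (le_antisymm hl1 hb)
    · rw [show ((pvTN (r - 1) + c + r : Nat) : Int) + 1 = ((pvTN (r - 1) + c + r + 1 : Nat) : Int)
          from by push_cast; ring, pvGetA_nat] at hb
      have hl2 : ns.getD (pvTN (r - 1) + c + r) 0 ≤ ns.getD (pvTN (r - 1) + c + r + 1) 0 :=
        hmono _ _ (by omega) (by omega)
      exact hall c hc (le_antisymm hl1 (le_trans hl2 hb))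

lemma pvA_iff (ns : List Int) (hNat : Nat) (h2 : 2 ≤ hNat)
    (hmono : ∀ p q : Nat, p ≤ q → q < ns.length → ns.getD p 0 ≤ ns.getD q 0)
    (hN : ns.length = pvTN hNat) :
    (pvArows ns 0 (PySem.List.pyRange 1 ((hNat : Nat) : Int) 1) = true ↔
      ¬ pvBad ((hNat : Nat) : Int) ns) := by
  have H := pvArows_iff ns (hNat - 1) 1 (le_refl 1)
  rw [show (1 + (hNat - 1)) = hNat from by omega] at H
  rw [show pvTN (1 - 1) = 0 from rfl] at H
  simp only [Nat.cast_zero, Nat.cast_one] at H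
  rw [H]
  constructor
  · intro hall hbad
    obtain ⟨p, r, hr1, hrh, hp1, hp2, heq⟩ := hbad
    have hrn : r < hNat := by exact_mod_cast hrh
    have hT1 := pvTN_pred hr1
    have hcols := (pvAcols_row_iff ns hmono r hr1
      (by rw [hN]; exact pvTN_mono (by omega))).mp (hall r hr1 hrn)
    have hcc : p - pvTN (r - 1) < r := by omega
    have := hcols (p - pvTN (r - 1)) hcc
    rw [show pvTN (r - 1) + (p - pvTN (r - 1)) = p from by omega] at this
    exact this heq
  · intro hnb r hr1 hrn
    rw [pvAcols_row_iff ns hmono r hr1 (by rw [hN]; exact pvTN_mono (by omega))]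
    intro c hc heq
    have hT1 := pvTN_pred hr1
    exact hnb ⟨pvTN (r - 1) + c, r, hr1, by exact_mod_cast hrn, by omega, by omega, heq⟩

-- ---------- B-side characterisation ----------

-- proof-side form of the comprehension's condition at a Nat index
def pvStartP (ns : List Int) (k : Nat) : Bool :=
  (k == 0) || !(ns.getD (k - 1) 0 == ns.getD k 0)

lemma pvStartB_nat (ns : List Int) (k : Nat) : pvStartB ns (k : Int) = pvStartP ns k := by
  cases k with
  | zero => simp [pvStartB, pvStartP]
  | succ m =>
    unfold pvStartB pvStartP
    rw [show ((m + 1 : Nat) : Int) - 1 = ((m : Nat) : Int) from by push_cast; ring,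
      pvGetA_nat, pvGetA_nat]
    have e1 : ((((m + 1 : Nat)) : Int) == 0) = false := by
      rw [beq_eq_false_iff_ne]; push_cast; omega
    have e2 : (((m + 1 : Nat)) == 0) = false := by simp
    rw [e1, e2]
    simp

lemma pvMem_startsB (ns : List Int) (x : Int) :
    x ∈ pvStartsB ns ↔ ∃ k : Nat, x = (k : Int) ∧ k < ns.length ∧ pvStartP ns k = true := by
  unfold pvStartsB
  rw [List.mem_filter, PySem.List.mem_pyRange_one]
  constructor
  · rintro ⟨⟨h0, hn⟩, hp⟩
    obtain ⟨k, rfl⟩ : ∃ k : Nat, x = (k : Int) := ⟨x.toNat, (Int.toNat_of_nonneg h0).symm⟩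
    exact ⟨k, rfl, by exact_mod_cast hn, by rw [← pvStartB_nat]; exact hp⟩
  · rintro ⟨k, rfl, hk, hp⟩
    exact ⟨⟨by positivity, by exact_mod_cast hk⟩, by rw [pvStartB_nat]; exact hp⟩

lemma pvBounds_pairwise (ns : List Int) : (pvBoundsB ns).Pairwise (· < ·) := by
  unfold pvBoundsB
  rw [List.pairwise_append]
  refine ⟨List.Pairwise.filter _ (PySem.List.pairwise_lt_pyRange_one 0 (ns.length : Int)), by simp, ?_⟩
  intro x hx y hy
  obtain ⟨k, rfl, hk, _⟩ := (pvMem_startsB ns x).mp hx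
  simp only [List.mem_singleton] at hy
  subst hy
  exact_mod_cast hk

lemma pvBounds_getElem (ns : List Int) (i : Nat) (hi : i < (pvBoundsB ns).length) :
    ∃ k : Nat, (pvBoundsB ns)[i] = (k : Int) ∧
      ((i + 1 < (pvBoundsB ns).length ∧ k < ns.length ∧ pvStartP ns k = true) ∨
       (i + 1 = (pvBoundsB ns).length ∧ k = ns.length)) := by
  have hlen : (pvBoundsB ns).length = (pvStartsB ns).length + 1 := by
    simp [pvBoundsB]
  rcases lt_or_ge i (pvStartsB ns).length with hlt | hge
  · have hb : (pvBoundsB ns)[i] = (pvStartsB ns)[i] := by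
      unfold pvBoundsB
      exact List.getElem_append_left hlt
    have hm : (pvStartsB ns)[i] ∈ pvStartsB ns := List.getElem_mem _
    obtain ⟨k, hk1, hk2, hk3⟩ := (pvMem_startsB ns _).mp hm
    exact ⟨k, by rw [hb, hk1], Or.inl ⟨by omega, hk2, hk3⟩⟩
  · have hieq : i = (pvStartsB ns).length := by omega
    subst hieq
    refine ⟨ns.length, ?_, Or.inr ⟨by omega, rfl⟩⟩
    unfold pvBoundsB
    simp

lemma pvBounds_lt (ns : List Int) (i j : Nat) (hj : j < (pvBoundsB ns).length)
    (hij : i < j) : (pvBoundsB ns)[i]'(by omega) < (pvBoundsB ns)[j] :=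
  List.pairwise_iff_getElem.mp (pvBounds_pairwise ns) i j (by omega) hj hij

-- between two consecutive bounds there is no run start
lemma pvNo_start_between (ns : List Int) (i : Nat) (hi : i + 1 < (pvBoundsB ns).length)
    (k : Nat) (hk : k < ns.length)
    (h1 : (pvBoundsB ns)[i]'(by omega) < (k : Int)) (h2 : (k : Int) < (pvBoundsB ns)[i + 1]) :
    pvStartP ns k = false := by
  by_contra hp
  rw [Bool.not_eq_false] at hp
  have hmem : (k : Int) ∈ pvStartsB ns := (pvMem_startsB ns _).mpr ⟨k, rfl, hk, hp⟩
  obtain ⟨j, hj, hjk⟩ := List.mem_iff_getElem.mp hmem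
  have hbj : (pvBoundsB ns)[j]'(by simp [pvBoundsB]; omega) = (k : Int) := by
    simp only [pvBoundsB]; rw [List.getElem_append_left hj]; exact hjk
  have hij : i < j := by
    rcases lt_trichotomy i j with h | h | h
    · exact h
    · exfalso; subst h; rw [hbj] at h1; omega
    · exfalso
      have := pvBounds_lt ns j i (by omega) h
      rw [hbj] at this; omega
  have hji : j < i + 1 := by
    rcases lt_trichotomy j (i + 1) with h | h | h
    · exact h
    · exfalso; subst h; rw [hbj] at h2; omega
    · exfalso
      have := pvBounds_lt ns (i + 1) j (by simp [pvBoundsB]; omega) h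
      rw [hbj] at this; omega
  omega

-- a run of equal values between consecutive bounds
lemma pvRun_const (ns : List Int) (i : Nat) (hi : i + 1 < (pvBoundsB ns).length)
    (a b : Nat) (ha : (pvBoundsB ns)[i]'(by omega) = (a : Int)) (hb : (pvBoundsB ns)[i + 1] = (b : Int))
    (hbn : b ≤ ns.length) :
    ∀ k : Nat, a ≤ k → k < b → ns.getD k 0 = ns.getD a 0 := by
  intro k
  induction k with
  | zero =>
    intro h1 _
    have : a = 0 := by omega
    rw [this]
  | succ m ih =>
    intro h1 h2
    rcases Nat.eq_or_lt_of_le h1 with he | hlt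
    · rw [← he]
    · have hcur := ih (by omega) (by omega)
      have hs : pvStartP ns (m + 1) = false := by
        apply pvNo_start_between ns i hi (m + 1) (by omega)
        · rw [ha]; exact_mod_cast (by omega : a < m + 1)
        · rw [hb]; exact_mod_cast h2
      unfold pvStartP at hs
      simp only [Nat.add_sub_cancel, Bool.or_eq_false_iff, Bool.not_eq_false',
        beq_iff_eq] at hs
      rw [← hs.2]
      exact hcur


-- every index below n lies between two consecutive bounds
lemma pvCover (ns : List Int) (p : Nat) (hp : p < ns.length) :
    ∃ i, ∃ hi : i + 1 < (pvBoundsB ns).length,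
      (pvBoundsB ns)[i]'(by omega) ≤ (p : Int) ∧ (p : Int) < (pvBoundsB ns)[i + 1] := by
  have h0 : pvStartP ns 0 = true := by simp [pvStartP]
  set s := Nat.findGreatest (fun k => pvStartP ns k = true) p with hsdef
  have hs : pvStartP ns s = true :=
    Nat.findGreatest_spec (P := fun k => pvStartP ns k = true) (Nat.zero_le p) h0
  have hsp : s ≤ p := Nat.findGreatest_le p
  have hmem : (s : Int) ∈ pvStartsB ns := (pvMem_startsB ns _).mpr ⟨s, rfl, by omega, hs⟩
  obtain ⟨j, hj, hjs⟩ := List.mem_iff_getElem.mp hmem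
  have hlenb : (pvBoundsB ns).length = (pvStartsB ns).length + 1 := by simp [pvBoundsB]
  have hbj : (pvBoundsB ns)[j]'(by omega) = (s : Int) := by
    simp only [pvBoundsB]
    rw [List.getElem_append_left hj]; exact hjs
  refine ⟨j, by omega, ?_, ?_⟩
  · rw [hbj]; exact_mod_cast hsp
  · by_contra hcon
    push_neg at hcon
    obtain ⟨k2, hbk2, hcase⟩ := pvBounds_getElem ns (j + 1) (by omega)
    rw [hbk2] at hcon
    have hk2p : k2 ≤ p := by exact_mod_cast hcon
    rcases hcase with ⟨_, hk2n, hk2s⟩ | ⟨_, hk2n⟩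
    · have hlt : (s : Int) < (k2 : Int) := by
        have := pvBounds_lt ns j (j + 1) (by omega) (by omega)
        rw [hbj, hbk2] at this; exact this
      exact Nat.findGreatest_is_greatest (P := fun k => pvStartP ns k = true)
        (by exact_mod_cast hlt) hk2p hk2s
    · omega

lemma pvRowOfB_go (sN : Nat) :
    ∀ (m r : Nat), 1 ≤ r → pvTN (r - 1) ≤ sN → sN + 1 - pvTN (r - 1) ≤ m →
      ∃ ρ : Nat, r ≤ ρ ∧ pvRowOfB m (sN : Int) (r : Int) = (ρ : Int) ∧
        pvTN (ρ - 1) ≤ sN ∧ sN < pvTN ρ := by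
  intro m
  induction m with
  | zero => intro r h1 h2 h3; omega
  | succ m ih =>
    intro r h1 h2 h3
    have hTs : pvTN r = pvTN (r - 1) + r := (pvTN_pred h1).symm
    show (∃ ρ : Nat, r ≤ ρ ∧
      (if PySem.Int.floordiv ((r : Int) * ((r : Int) + 1)) 2 ≤ (sN : Int) then
        pvRowOfB m (sN : Int) ((r : Int) + 1) else (r : Int)) = (ρ : Int) ∧
      pvTN (ρ - 1) ≤ sN ∧ sN < pvTN ρ)
    by_cases hg : PySem.Int.floordiv ((r : Int) * ((r : Int) + 1)) 2 ≤ (sN : Int)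
    · rw [if_pos hg]
      have hg' : pvTN r ≤ sN := by
        rw [show (r : Int) * ((r : Int) + 1) = ((r * (r + 1) : Nat) : Int) from by push_cast; ring,
          show (2 : Int) = ((2 : Nat) : Int) from by norm_num,
          PySem.Int.floordiv_natCast] at hg
        exact_mod_cast hg
      obtain ⟨ρ, hρ1, hρ2, hρ3, hρ4⟩ := ih (r + 1) (by omega) (by simpa using hg')
        (by simp only [Nat.add_sub_cancel]; omega)
      refine ⟨ρ, by omega, ?_, hρ3, hρ4⟩
      rw [show (r : Int) + 1 = ((r + 1 : Nat) : Int) from by push_cast; ring]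
      exact hρ2
    · rw [if_neg hg]
      have hg' : sN < pvTN r := by
        rw [show (r : Int) * ((r : Int) + 1) = ((r * (r + 1) : Nat) : Int) from by push_cast; ring,
          show (2 : Int) = ((2 : Nat) : Int) from by norm_num,
          PySem.Int.floordiv_natCast] at hg
        have : ¬ ((r * (r + 1) / 2 : Nat) : Int) ≤ (sN : Int) := hg
        have h' : ¬ (r * (r + 1) / 2 ≤ sN) := by exact_mod_cast this
        unfold pvTN
        omega
      exact ⟨r, le_refl r, rfl, h2, hg'⟩

lemma pvRowOfB_spec (sN : Nat) :
    ∃ ρ : Nat, 1 ≤ ρ ∧ pvRowOfB (((sN : Int)).toNat + 2) (sN : Int) 1 = (ρ : Int) ∧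
      pvTN (ρ - 1) ≤ sN ∧ sN < pvTN ρ := by
  have h := pvRowOfB_go sN (sN + 2) 1 (le_refl 1) (by simp [pvTN]) (by simp [pvTN])
  rw [show ((1 : Nat) : Int) = (1 : Int) from by norm_num] at h
  rw [show ((sN : Int)).toNat + 2 = sN + 2 from by omega]
  exact h

lemma pvPairsB_true_iff (h_ : Int) (ps : List (Int × Int)) :
    pvPairsB h_ ps = true ↔
      ∀ q ∈ ps, ¬ (pvRowOfB (q.1.toNat + 2) q.1 1 < h_ ∧ pvRowOfB (q.1.toNat + 2) q.1 1 < q.2 - q.1) := by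
  induction ps with
  | nil => simp [pvPairsB]
  | cons q rest ih =>
    obtain ⟨a, b⟩ := q
    simp only [pvPairsB]
    split_ifs with h
    · simp only [false_iff]
      intro hall
      exact hall (a, b) (List.mem_cons_self) h
    · rw [ih]
      constructor
      · intro hall q hm
        rcases List.mem_cons.mp hm with rfl | hm'
        · exact h
        · exact hall q hm'
      · intro hall q hm
        exact hall q (List.mem_cons_of_mem _ hm)

lemma pvB_expr_eq (ns : List Int) :
    (pvBoundsB ns).zip (PySem.List.slice (pvBoundsB ns) (some 1) none)
      = (pvBoundsB ns).zip (pvBoundsB ns).tail := by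
  rw [PySem.List.slice_from_one]

lemma pvB_trivial (h_ : Int) (ns : List Int) (hh : h_ ≤ 1) :
    pvPairsB h_ ((pvBoundsB ns).zip (PySem.List.slice (pvBoundsB ns) (some 1) none)) = true := by
  rw [pvB_expr_eq, pvPairsB_true_iff]
  rintro ⟨a, b⟩ hq ⟨hc1, hc2⟩
  have ha : a ∈ pvBoundsB ns := (List.of_mem_zip hq).1
  have hcast : ∃ k : Nat, a = (k : Int) := by
    simp only [pvBoundsB, List.mem_append] at ha
    rcases ha with h | h
    · obtain ⟨k, rfl, _, _⟩ := (pvMem_startsB ns a).mp h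
      exact ⟨k, rfl⟩
    · simp only [List.mem_singleton] at h
      exact ⟨ns.length, h⟩
  obtain ⟨k, rfl⟩ := hcast
  obtain ⟨ρ, hρ1, hρ2, _, _⟩ := pvRowOfB_spec k
  rw [hρ2] at hc1
  have : (1 : Int) ≤ (ρ : Int) := by exact_mod_cast hρ1
  omega

lemma pvB_iff (ns : List Int) (hNat : Nat)
    (hmono : ∀ p q : Nat, p ≤ q → q < ns.length → ns.getD p 0 ≤ ns.getD q 0)
    (hN : ns.length = pvTN hNat) :
    (pvPairsB ((hNat : Nat) : Int)
        ((pvBoundsB ns).zip (PySem.List.slice (pvBoundsB ns) (some 1) none)) = true ↔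
      ¬ pvBad ((hNat : Nat) : Int) ns) := by
  rw [pvB_expr_eq, pvPairsB_true_iff]
  constructor
  · intro hall hbad
    obtain ⟨p, r, hr1, hrh, hp1, hp2, heq⟩ := hbad
    have hrn : r < hNat := by exact_mod_cast hrh
    have hT1 := pvTN_pred hr1
    have hT2 := pvTN_succ r
    have hpn : p + r < ns.length := by
      rw [hN]
      have := pvTN_mono (show r + 1 ≤ hNat by omega)
      omega
    obtain ⟨i, hi, hle, hlt⟩ := pvCover ns p (by omega)
    obtain ⟨a, hba, hacase⟩ := pvBounds_getElem ns i (by omega)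
    obtain ⟨b, hbb, hbcase⟩ := pvBounds_getElem ns (i + 1) hi
    have hbn : b ≤ ns.length := by rcases hbcase with ⟨_, h, _⟩ | ⟨_, h⟩ <;> omega
    have hap : a ≤ p := by rw [hba] at hle; exact_mod_cast hle
    have hpb : p < b := by rw [hbb] at hlt; exact_mod_cast hlt
    obtain ⟨ρ, hρ1, hρ2, hρ3, hρ4⟩ := pvRowOfB_spec a
    have hρr : ρ ≤ r := by
      by_contra hcon
      push_neg at hcon
      have := pvTN_mono (show r ≤ ρ - 1 by omega)
      omega
    have hconst := pvRun_const ns i hi a b hba hbb hbn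
    have hga : ns.getD p 0 = ns.getD a 0 := hconst p hap hpb
    have hsq : ∀ k : Nat, a ≤ k → k ≤ p + r → ns.getD k 0 = ns.getD a 0 := by
      intro k h1 h2
      have l1 : ns.getD a 0 ≤ ns.getD k 0 := hmono a k h1 (by omega)
      have l2 : ns.getD k 0 ≤ ns.getD (p + r) 0 := hmono k (p + r) h2 (by omega)
      have l3 : ns.getD (p + r) 0 = ns.getD a 0 := by rw [← heq, hga]
      omega
    have hb_gt : a + ρ < b := by
      by_contra hcon
      push_neg at hcon
      have hbp : b ≤ p + r := by omega
      rcases hbcase with ⟨_, hbl, hbs⟩ | ⟨_, hbeq⟩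
      · have hab : a < b := by
          have := pvBounds_lt ns i (i + 1) hi (by omega)
          rw [hba, hbb] at this
          exact_mod_cast this
        simp only [pvStartP, Bool.or_eq_true, beq_iff_eq, Bool.not_eq_true',
          beq_eq_false_iff_ne] at hbs
        rcases hbs with hb0 | hne
        · omega
        · have e1 := hsq (b - 1) (by omega) (by omega)
          have e2 := hsq b (by omega) hbp
          exact hne (by rw [e1, e2])
      · omega
    have hpair : ((pvBoundsB ns)[i]'(by omega), (pvBoundsB ns)[i + 1])
        ∈ (pvBoundsB ns).zip (pvBoundsB ns).tail := by
      rw [List.mem_iff_getElem]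
      refine ⟨i, by simp [List.length_zip]; omega, ?_⟩
      rw [List.getElem_zip, List.getElem_tail]
    apply hall _ hpair
    refine ⟨?_, ?_⟩
    · show pvRowOfB (((pvBoundsB ns)[i]'(by omega)).toNat + 2) ((pvBoundsB ns)[i]'(by omega)) 1 < ((hNat : Nat) : Int)
      rw [hba, hρ2]
      exact_mod_cast (show ρ < hNat by omega)
    · show pvRowOfB (((pvBoundsB ns)[i]'(by omega)).toNat + 2) ((pvBoundsB ns)[i]'(by omega)) 1 < (pvBoundsB ns)[i + 1] - (pvBoundsB ns)[i]'(by omega)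
      rw [hba, hbb, hρ2]
      have : (a : Int) + (ρ : Int) < (b : Int) := by exact_mod_cast hb_gt
      omega
  · intro hnb q hq
    rintro ⟨hc1, hc2⟩
    obtain ⟨i, hilen, hqi⟩ := List.mem_iff_getElem.mp hq
    have hzl : i + 1 < (pvBoundsB ns).length := by
      simp [List.length_zip] at hilen
      omega
    rw [List.getElem_zip, List.getElem_tail] at hqi
    obtain ⟨a, hba, hacase⟩ := pvBounds_getElem ns i (by omega)
    obtain ⟨b, hbb, hbcase⟩ := pvBounds_getElem ns (i + 1) hzl
    have hbn : b ≤ ns.length := by rcases hbcase with ⟨_, h, _⟩ | ⟨_, h⟩ <;> omega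
    rcases hacase with ⟨_, han, has⟩ | ⟨habs, _⟩
    swap
    · omega
    obtain ⟨ρ, hρ1, hρ2, hρ3, hρ4⟩ := pvRowOfB_spec a
    rw [← hqi] at hc1 hc2
    simp only at hc1 hc2
    rw [hba, hρ2] at hc1
    rw [hba, hbb, hρ2] at hc2
    have hρh : ρ < hNat := by exact_mod_cast hc1
    have haρb : a + ρ < b := by
      have h' : (a : Int) + (ρ : Int) < (b : Int) := by omega
      exact_mod_cast h'
    have hconst := pvRun_const ns i hzl a b hba hbb hbn
    refine absurd ?_ hnb
    exact ⟨a, ρ, hρ1, by exact_mod_cast hρh, hρ3, hρ4,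
      (hconst (a + ρ) (by omega) haρb).symm⟩

-- ===== VERDICT (by name: the statement is the Claim_ definition above) =====
theorem is_special_triangle_spec : Claim_equal_is_special_triangle := by
  intro h_ numbers _
  unfold Spec_is_special_triangle is_special_triangle is_special_triangle_alt
  dsimp only
  by_cases hne : (numbers.length : Int) ≠ PySem.Int.floordiv (h_ * (h_ + 1)) 2
  · rw [if_pos hne, if_pos hne]
  · rw [if_neg hne, if_neg hne]
    push_neg at hne
    set ns := PySem.List.sorted numbers (fun x => x) false with hns
    have hmono : ∀ p q : Nat, p ≤ q → q < ns.length → ns.getD p 0 ≤ ns.getD q 0 := by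
      intro p q hpq hq
      rw [hns] at hq ⊢
      rw [List.getD_eq_getElem _ 0 (lt_of_le_of_lt hpq hq), List.getD_eq_getElem _ 0 hq]
      exact PySem.List.sorted_id_getElem_mono numbers hpq hq
    have hlenn : ns.length = numbers.length := by
      rw [hns, PySem.List.length_sorted]
    by_cases hh2 : 2 ≤ h_
    · set m := h_.toNat with hm
      have hcast : h_ = ((m : Nat) : Int) := by omega
      have hm2 : 2 ≤ m := by omega
      have hNlen : ns.length = pvTN m := by
        have h1 : ((ns.length : Nat) : Int) = ((pvTN m : Nat) : Int) := by
          rw [hlenn, hne, hcast]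
          rw [show ((m : Nat) : Int) * (((m : Nat) : Int) + 1) = ((m * (m + 1) : Nat) : Int)
              from by push_cast; ring,
            show (2 : Int) = ((2 : Nat) : Int) from by norm_num,
            PySem.Int.floordiv_natCast]
          simp [pvTN]
        exact_mod_cast h1
      have HA := pvA_iff ns m hm2 hmono hNlen
      have HB := pvB_iff ns m hmono hNlen
      rw [hcast]
      rw [show (pvArows ns 0 (PySem.List.pyRange 1 ((m : Nat) : Int) 1))
          = (pvPairsB ((m : Nat) : Int)
              ((pvBoundsB ns).zip (PySem.List.slice (pvBoundsB ns) (some 1) none)))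
          from by rw [Bool.eq_iff_iff, HA, HB]]
    · push_neg at hh2
      have hA : pvArows ns 0 (PySem.List.pyRange 1 h_ 1) = true := by
        rw [PySem.List.pyRange_one_eq_nil (by omega)]
        rfl
      have hB := pvB_trivial h_ ns (by omega)
      rw [hA, hB]
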